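-- pv_equiv track=rewrite | github.com/jramaswami/Binary_Search_Python | next_closest_odd_digit_number.py | solve
-- ===== SOURCE A (Python) =====
-- def solve(n):
--     # Special case:
--     if n == 0:
--         return 1
--
--     digits = list(int(i) for i in str(n))
--     soln_a = [1 for _ in digits]
--     soln_b = [9 for _ in digits]
--     for i, d in enumerate(digits):
--         if d % 2:
--             soln_a[i] = d
--             soln_b[i] = d
--         else:
--             soln_a[i] = d + 1
--             soln_b[i] = d - 1
--             break
--
--     # Fix any negatives.
--     for off, _ in enumerate(soln_b):
--         i = len(soln_b) - off - 1
--         if i == 0: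
--             if soln_b[i] < 0:
--                 soln_b[i] = 0
--         else:
--             if soln_b[i] < 0:
--                 soln_b[i-1] -= 2
--                 soln_b[i] = 9
--
--     soln_a = int("".join(str(d) for d in soln_a))
--     soln_b = int("".join(str(d) for d in soln_b))
--     delta_a = soln_a - n
--     delta_b = n - soln_b
--     if delta_b < delta_a:
--         return soln_b
--     return soln_a
-- ===== SOURCE B (Python) =====
-- def _unrank(r):
--     # r-th all-odd-digit number (r >= 1): bijective base-5 numeral with digits 1,3,5,7,9
--     m, p = 0, 1
--     while r > 0:
--         r, q = divmod(r - 1, 5)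
--         m += (2 * q + 1) * p
--         p *= 10
--     return m
--
--
-- def solve(n):
--     s = str(n)
--     k = len(s)
--     # r = how many all-odd-digit numbers are <= n  (rank of n)
--     r = (5 ** k - 5) // 4
--     tight = True
--     for i, c in enumerate(s):
--         d = int(c)
--         r += d // 2 * 5 ** (k - 1 - i)
--         if d % 2 == 0:
--             tight = False
--             break
--     if tight:
--         r += 1
--     lo = _unrank(r)
--     hi = _unrank(r + 1)
--     if r > 0 and n - lo < hi - n:
--         return lo
--     return hi
-- ===== Notes on version B (the rewrite author's own statement) =====
-- stated objective: alternative
-- what changed: Replaces A's digit-array surgery (two sentinel-filled candidate arrays plus a backward borrow-fixup pass) by an order-isomorphism: all-odd-digit numbers are exactly the bijective base-5 numerals over {1,3,5,7,9}, so B computes n's rank among them and unranks r and r+1 to get the two neighbours.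
import Mathlib
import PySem

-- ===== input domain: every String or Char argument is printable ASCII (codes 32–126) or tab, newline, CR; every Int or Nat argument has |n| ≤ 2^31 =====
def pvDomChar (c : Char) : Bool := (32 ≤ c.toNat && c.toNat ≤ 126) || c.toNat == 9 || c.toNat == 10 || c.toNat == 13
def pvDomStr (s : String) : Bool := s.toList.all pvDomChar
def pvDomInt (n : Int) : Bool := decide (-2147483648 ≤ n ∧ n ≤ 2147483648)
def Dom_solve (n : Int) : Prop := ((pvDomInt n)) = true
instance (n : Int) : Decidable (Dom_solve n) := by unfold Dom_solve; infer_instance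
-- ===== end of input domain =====

-- B replaces A's digit-array surgery by the rank/unrank order-isomorphism between all-odd-digit
-- numbers and bijective base-5 numerals over {1,3,5,7,9}; alternative algorithm, same O(k) cost.

-- ===== PORT A =====

-- hand-port of Python's int(c) for a single decimal-digit character '0'..'9'; exact on that
-- shape, the only one reached for n ≥ 0 (Pre_solve); Python raises ValueError on '-' (n < 0).
def charDigit (c : Char) : Int := (c.toNat : Int) - 48

-- the `for i, d in enumerate(digits)` loop with break: prefix while odd, at the first even
-- digit write d±1 and keep the untouched sentinel fills (1s / 9s) for the remaining positions
def buildAB : List Int → List Int × List Int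
  | [] => ([], [])
  | d :: ds =>
    if PySem.Int.mod d 2 ≠ 0 then
      let ab := buildAB ds
      (d :: ab.1, d :: ab.2)
    else ((d + 1) :: ds.map (fun _ => (1 : Int)), (d - 1) :: ds.map (fun _ => (9 : Int)))

-- the backward `Fix any negatives` loop: fixCore x xs processes positions right-to-left and
-- returns the (possibly borrow-decremented) value at x's position together with the fixed tail
def fixCore : Int → List Int → Int × List Int
  | x, [] => (x, [])
  | x, y :: ys =>
    let vt := fixCore y ys
    if vt.1 < 0 then (x - 2, 9 :: vt.2) else (x, vt.1 :: vt.2)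

def fixNeg : List Int → List Int
  | [] => []
  | x :: xs =>
    let vt := fixCore x xs
    (if vt.1 < 0 then 0 else vt.1) :: vt.2

-- hand-port of Python's int(s) for a nonempty string of decimal digits (leading zeros allowed)
-- — the only shape the joins below produce when n ≥ 0; exact there.
def intOfDigitStr (s : String) : Int := s.toList.foldl (fun a c => 10 * a + charDigit c) 0

def solve (n : Int) : Int :=
  if n = 0 then 1
  else
    let digits : List Int := (PySem.Int.toStr n).toList.map charDigit
    let ab := buildAB digits
    let solnB := fixNeg ab.2
    let a := intOfDigitStr (PySem.Str.join "" (ab.1.map PySem.Int.toStr))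
    let b := intOfDigitStr (PySem.Str.join "" (solnB.map PySem.Int.toStr))
    if n - b < a - n then b else a

-- ===== PORT B =====

-- hand-port of Python's int(c) for a single decimal-digit character, as in port A
def charDigitB (c : Char) : Int := (c.toNat : Int) - 48

-- the `for i, c in enumerate(s)` loop with break: contribution d//2 * 5**(k-1-i) per position,
-- tight = loop ran to the end without meeting an even digit
def rankGo : List Char → Int × Bool
  | [] => (0, true)
  | c :: cs =>
    let d := charDigitB c   -- int(c): exact for digit characters, the only shape for n ≥ 0
    if PySem.Int.mod d 2 = 0 then (PySem.Int.floordiv d 2 * 5 ^ cs.length, false)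
    else
      let rt := rankGo cs
      (PySem.Int.floordiv d 2 * 5 ^ cs.length + rt.1, rt.2)

-- the `while r > 0` loop of _unrank, with accumulators m and p
def unrankGo (r m p : Int) : Int :=
  if 0 < r then
    unrankGo (PySem.Int.floordiv (r - 1) 5)
      (m + (2 * PySem.Int.mod (r - 1) 5 + 1) * p) (p * 10)
  else m
termination_by r.toNat
decreasing_by
  rw [PySem.Int.floordiv_eq_ediv_of_pos (by norm_num)]
  have h1 : (r - 1) / 5 ≤ r - 1 := Int.ediv_le_self _ (by omega)
  have h2 : 0 ≤ (r - 1) / 5 := Int.ediv_nonneg (by omega) (by norm_num)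
  omega

def solve_alt (n : Int) : Int :=
  let s := (PySem.Int.toStr n).toList
  let rt := rankGo s
  let r := PySem.Int.floordiv (5 ^ s.length - 5) 4 + rt.1 + (if rt.2 then 1 else 0)
  let lo := unrankGo r 0 1
  let hi := unrankGo (r + 1) 0 1
  if 0 < r ∧ n - lo < hi - n then lo else hi

-- ===== PRECONDITION & SPEC =====
-- Python A raises ValueError on every n < 0 (int('-') while reading str(n)); so does B.
def Pre_solve (n : Int) : Prop := 0 ≤ n
instance (n : Int) : Decidable (Pre_solve n) := by unfold Pre_solve; infer_instance
def pvWitness_solve : Int := 7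

def Spec_solve (n : Int) (out : Int) : Prop := out = solve_alt n
instance (n : Int) (out : Int) : Decidable (Spec_solve n out) := by unfold Spec_solve; infer_instance

-- ===== CLAIM (what is proved, stated in full; the proofs are below) =====
def Claim_equal_solve : Prop := ∀ (n : Int), Dom_solve n → Pre_solve n → Spec_solve n (solve n)

-- ===== LEMMAS AND PROOFS =====

-- digit-list predicates and the value / rank polynomials
def DigD (L : List Int) : Prop := ∀ d ∈ L, 0 ≤ d ∧ d ≤ 9
def OddD (L : List Int) : Prop := ∀ d ∈ L, 0 ≤ d ∧ d ≤ 9 ∧ d % 2 = 1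
def valI (L : List Int) : Int := L.foldl (fun a d => 10 * a + d) 0
def RX (L : List Int) : Int := L.foldl (fun a d => 5 * a + (d + 1) / 2) 0
def ov : Nat → Int
  | 0 => 0
  | m + 1 => 5 * ov m + 1
def valN (L : List Nat) : Nat := L.foldl (fun a d => 10 * a + d) 0

theorem foldl_affine (c : Int) (g : Int → Int) :
    ∀ (L : List Int) (a : Int),
      L.foldl (fun a d => c * a + g d) a = a * c ^ L.length + L.foldl (fun a d => c * a + g d) 0 := by
  intro L
  induction L with
  | nil => intro a; simp
  | cons d L ih =>
    intro a
    simp only [List.foldl_cons, List.length_cons]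
    rw [ih (c * a + g d), ih (c * 0 + g d)]
    ring

theorem valI_append (M : List Int) (d : Int) : valI (M ++ [d]) = 10 * valI M + d := by
  simp [valI, List.foldl_append]
theorem valI_cons (d : Int) (M : List Int) : valI (d :: M) = d * 10 ^ M.length + valI M := by
  have h := foldl_affine 10 (fun d => d) M (10 * 0 + d)
  simpa [valI] using h
theorem RX_cons (d : Int) (M : List Int) : RX (d :: M) = (d + 1) / 2 * 5 ^ M.length + RX M := by
  have h := foldl_affine 5 (fun d => (d + 1) / 2) M (5 * 0 + (d + 1) / 2)
  simpa [RX] using h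
theorem RX_append (M : List Int) (d : Int) : RX (M ++ [d]) = 5 * RX M + (d + 1) / 2 := by
  simp [RX, List.foldl_append]

theorem RX_appendL (A B : List Int) : RX (A ++ B) = RX A * 5 ^ B.length + RX B := by
  rw [RX, List.foldl_append]
  have h := foldl_affine 5 (fun d => (d + 1) / 2) B (RX A)
  exact h

theorem four_ov (m : Nat) : 4 * ov m = 5 ^ m - 1 := by
  induction m with
  | zero => simp [ov]
  | succ m ih => rw [ov, pow_succ]; omega
theorem ov_nonneg (m : Nat) : 0 ≤ ov m := by
  have h := four_ov m
  have : (1 : Int) ≤ 5 ^ m := one_le_pow₀ (by norm_num)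
  omega
theorem ov_succ' (m : Nat) : ov (m + 1) = 5 ^ m + ov m := by
  have h1 := four_ov (m + 1)
  have h2 := four_ov m
  rw [pow_succ] at h1
  omega
theorem ov_ge_one (m : Nat) : 1 ≤ ov (m + 1) := by
  have := ov_nonneg m
  rw [ov]; omega
theorem ov3 (p t : Nat) : ov (p + t + 1) = 5 ^ (t + 1) * ov p + 5 ^ t + ov t := by
  induction p with
  | zero =>
    have h := ov_succ' t
    simp only [show ov 0 = 0 from rfl, mul_zero, zero_add]
    exact h
  | succ p ih =>
    have h1 : p + 1 + t + 1 = (p + t + 1) + 1 := by omega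
    rw [h1, ov_succ', ih, ov_succ']
    rw [show p + t = t + p from by omega, pow_add, pow_add, pow_succ]
    ring

theorem basep_eq (k : Nat) : PySem.Int.floordiv (5 ^ k - 5) 4 = ov k - 1 := by
  rw [PySem.Int.floordiv_eq_ediv_of_pos (by norm_num)]
  have h := four_ov k
  have h2 : (5 : Int) ^ k - 5 = 4 * (ov k - 1) := by omega
  rw [h2, Int.mul_ediv_cancel_left _ (by norm_num)]

theorem RX_replicate9 (t : Nat) : RX (List.replicate t 9) = ov (t + 1) - 1 := by
  induction t with
  | zero => simp [RX, ov]
  | succ t ih =>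
    rw [List.replicate_succ, RX_cons, List.length_replicate, ih, ov_succ' (t + 1)]
    norm_num [pow_succ]
    ring
theorem RX_replicate1 (t : Nat) : RX (List.replicate t 1) = ov t := by
  induction t with
  | zero => simp [RX, ov]
  | succ t ih =>
    rw [List.replicate_succ, RX_cons, List.length_replicate, ih, ov_succ' t]
    norm_num
theorem RX_nonneg (L : List Int) (h : DigD L) : 0 ≤ RX L := by
  induction L with
  | nil => simp [RX]
  | cons d M ih =>
    have hd := h d (by simp)
    have hM : DigD M := fun x hx => h x (by simp [hx])
    have h1 : 0 ≤ (d + 1) / 2 := by omega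
    have h2 : (0 : Int) ≤ 5 ^ M.length := by positivity
    have := ih hM
    rw [RX_cons]
    nlinarith
theorem RX_ge_ov (L : List Int) (h : OddD L) : ov L.length ≤ RX L := by
  induction L with
  | nil => simp [RX, ov]
  | cons d M ih =>
    have hd := h d (by simp)
    have hM : OddD M := fun x hx => h x (by simp [hx])
    have h1 : 1 ≤ (d + 1) / 2 := by omega
    have h2 : (0 : Int) < 5 ^ M.length := by positivity
    have := ih hM
    rw [RX_cons, List.length_cons, ov_succ']
    nlinarith

-- unrank: scaling, value on ranks of all-odd lists, strict monotonicity
theorem floordiv5_toNat_le (r : Int) (h : 0 < r) {k : Nat} (hk : r.toNat ≤ k + 1) :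
    (PySem.Int.floordiv (r - 1) 5).toNat ≤ k := by
  rw [PySem.Int.floordiv_eq_ediv_of_pos (by norm_num)]
  have h1 : (r - 1) / 5 ≤ r - 1 := Int.ediv_le_self _ (by omega)
  have h2 : 0 ≤ (r - 1) / 5 := Int.ediv_nonneg (by omega) (by norm_num)
  omega

theorem unrankGo_base (r m p : Int) (h : ¬ 0 < r) : unrankGo r m p = m := by
  conv_lhs => rw [unrankGo]
  simp [h]

theorem unrankGo_step' (r m p : Int) (h : 0 < r) :
    unrankGo r m p =
      unrankGo (PySem.Int.floordiv (r - 1) 5)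
        (m + (2 * PySem.Int.mod (r - 1) 5 + 1) * p) (p * 10) := by
  conv_lhs => rw [unrankGo]
  simp [h]

theorem unrankGo_scale_aux :
    ∀ (k : Nat) (r m p : Int), r.toNat ≤ k → unrankGo r m p = m + p * unrankGo r 0 1 := by
  intro k
  induction k with
  | zero =>
    intro r m p hr
    have h : ¬ 0 < r := by omega
    rw [unrankGo_base r m p h, unrankGo_base r 0 1 h]
    ring
  | succ k ih =>
    intro r m p hr
    by_cases h : 0 < r
    · have hdec := floordiv5_toNat_le r h hr
      rw [unrankGo_step' r m p h, unrankGo_step' r 0 1 h]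
      rw [ih _ _ _ hdec]
      conv_rhs => rw [ih _ _ _ hdec]
      ring
    · rw [unrankGo_base r m p h, unrankGo_base r 0 1 h]
      ring

theorem unrankGo_scale (r m p : Int) : unrankGo r m p = m + p * unrankGo r 0 1 :=
  unrankGo_scale_aux r.toNat r m p le_rfl

theorem unrankGo_zero (r : Int) (h : r ≤ 0) : unrankGo r 0 1 = 0 :=
  unrankGo_base r 0 1 (by omega)

theorem unrankGo_step (r : Int) (h : 0 < r) :
    unrankGo r 0 1 = (2 * ((r - 1) % 5) + 1) + 10 * unrankGo ((r - 1) / 5) 0 1 := by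
  rw [unrankGo_step' r 0 1 h, unrankGo_scale, PySem.Int.mod_eq_emod_of_pos (by norm_num),
    PySem.Int.floordiv_eq_ediv_of_pos (by norm_num)]
  ring
theorem u_rank (L : List Int) (h : OddD L) : unrankGo (RX L) 0 1 = valI L := by
  induction L using List.reverseRecOn with
  | nil => rw [show RX [] = 0 from rfl, unrankGo_zero 0 le_rfl]; rfl
  | append_singleton M d ih =>
    have hM : OddD M := fun x hx => h x (by simp [hx])
    have hd := h d (by simp)
    obtain ⟨q, hq, hq4⟩ : ∃ q : Int, d = 2 * q + 1 ∧ 0 ≤ q ∧ q ≤ 4 := ⟨(d - 1) / 2, by omega⟩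
    have hRM : 0 ≤ RX M := RX_nonneg M (fun x hx => ⟨(hM x hx).1, (hM x hx).2.1⟩)
    have hdd : (d + 1) / 2 = q + 1 := by omega
    rw [RX_append, hdd]
    have hpos : 0 < 5 * RX M + (q + 1) := by omega
    rw [unrankGo_step _ hpos]
    have hmod : (5 * RX M + (q + 1) - 1) % 5 = q := by omega
    have hdiv : (5 * RX M + (q + 1) - 1) / 5 = RX M := by omega
    rw [hmod, hdiv, ih hM, valI_append]
    omega
theorem u_mono_aux : ∀ (k : Nat) (r : Int), r.toNat ≤ k → 0 ≤ r →
    unrankGo r 0 1 < unrankGo (r + 1) 0 1 := by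
  intro k
  induction k with
  | zero =>
    intro r hr h0
    have hr0 : r = 0 := by omega
    subst hr0
    rw [unrankGo_zero 0 le_rfl]
    simp only [zero_add]
    rw [unrankGo_step 1 (by norm_num)]
    norm_num [unrankGo_zero 0 le_rfl]
  | succ k ih =>
    intro r hr h0
    by_cases h : 0 < r
    · have hq0 : 0 ≤ (r - 1) / 5 := Int.ediv_nonneg (by omega) (by norm_num)
      have hqk : ((r - 1) / 5).toNat ≤ k := by
        have := floordiv5_toNat_le r h hr
        rwa [PySem.Int.floordiv_eq_ediv_of_pos (by norm_num)] at this
      have hds : (r - 1) / 5 * 5 + (r - 1) % 5 = r - 1 := Int.ediv_mul_add_emod (r - 1) 5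
      have hs5 : 0 ≤ (r - 1) % 5 ∧ (r - 1) % 5 < 5 :=
        ⟨Int.emod_nonneg _ (by norm_num), Int.emod_lt_of_pos _ (by norm_num)⟩
      rw [unrankGo_step r h, unrankGo_step (r + 1) (by omega)]
      by_cases hs : (r - 1) % 5 ≤ 3
      · have hm : (r + 1 - 1) % 5 = (r - 1) % 5 + 1 := by omega
        have hd : (r + 1 - 1) / 5 = (r - 1) / 5 := by omega
        rw [hm, hd]
        omega
      · have hm : (r + 1 - 1) % 5 = 0 := by omega
        have hd : (r + 1 - 1) / 5 = (r - 1) / 5 + 1 := by omega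
        rw [hm, hd]
        have := ih _ hqk hq0
        omega
    · have hr0 : r = 0 := by omega
      subst hr0
      rw [unrankGo_zero 0 le_rfl]
      simp only [zero_add]
      rw [unrankGo_step 1 (by norm_num)]
      norm_num [unrankGo_zero 0 le_rfl]

theorem u_mono (r : Int) (hr : 0 ≤ r) : unrankGo r 0 1 < unrankGo (r + 1) 0 1 :=
  u_mono_aux r.toNat r le_rfl hr

-- buildAB
theorem buildAB_odd (L : List Int) (h : OddD L) : buildAB L = (L, L) := by
  induction L with
  | nil => rfl
  | cons d M ih =>
    have hd := h d (by simp)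
    have hM : OddD M := fun x hx => h x (by simp [hx])
    simp [buildAB, ih hM, hd.2.2]
theorem buildAB_split (P : List Int) (hP : OddD P) (E : Int) (hE : 0 ≤ E ∧ E ≤ 8 ∧ E % 2 = 0)
    (T : List Int) :
    buildAB (P ++ E :: T) =
      (P ++ (E + 1) :: List.replicate T.length 1, P ++ (E - 1) :: List.replicate T.length 9) := by
  induction P with
  | nil =>
    simp [buildAB, List.map_const', Int.dvd_of_emod_eq_zero hE.2.2]
  | cons d M ih =>
    have hd := hP d (by simp)
    have hM : OddD M := fun x hx => hP x (by simp [hx])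
    simp [buildAB, ih hM, hd.2.2]

-- fix
theorem fixCore_nonneg (xs : List Int) (h : ∀ d ∈ xs, 0 ≤ d) (x : Int) : fixCore x xs = (x, xs) := by
  induction xs generalizing x with
  | nil => rfl
  | cons y ys ih =>
    have hy := h y (by simp)
    have hys : ∀ d ∈ ys, 0 ≤ d := fun d hd => h d (by simp [hd])
    simp [fixCore, ih hys, show ¬ y < 0 from by omega]
theorem fixNeg_nonneg (L : List Int) (h : ∀ d ∈ L, 0 ≤ d) : fixNeg L = L := by
  cases L with
  | nil => rfl
  | cons x xs =>
    have hx := h x (by simp)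
    have hxs : ∀ d ∈ xs, 0 ≤ d := fun d hd => h d (by simp [hd])
    simp [fixNeg, fixCore_nonneg xs hxs x, show ¬ x < 0 from by omega]
theorem fixCore_neg1_nines (t : Nat) :
    fixCore (-1) (List.replicate t 9) = (-1, List.replicate t 9) := by
  cases t with
  | zero => rfl
  | succ t =>
    rw [List.replicate_succ]
    have h9 : ∀ d ∈ List.replicate t (9 : Int), 0 ≤ d := by
      intro d hd; rw [List.eq_of_mem_replicate hd]; norm_num
    simp [fixCore, fixCore_nonneg _ h9 9]

theorem key_fix (P : List Int) (hP : OddD P) (d : Int) (t : Nat) :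
    (P.all (· = 1) = true →
      fixCore d (P ++ (-1) :: List.replicate t 9) = (d - 2, List.replicate (P.length + t + 1) 9)) ∧
    (P.all (· = 1) = false →
      ∃ rest, fixCore d (P ++ (-1) :: List.replicate t 9) = (d, rest) ∧ OddD rest ∧
        rest.length = P.length + t + 1 ∧
        RX rest = 5 ^ (t + 1) * (RX P - ov P.length) + ov (P.length + t + 1) - 1) := by
  induction P generalizing d with
  | nil =>
    constructor
    · intro _
      show fixCore d (-1 :: List.replicate t 9) = _
      rw [show fixCore d (-1 :: List.replicate t 9) =
            (let vt := fixCore (-1) (List.replicate t 9);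
             if vt.1 < 0 then (d - 2, 9 :: vt.2) else (d, vt.1 :: vt.2)) from rfl,
        fixCore_neg1_nines]
      norm_num [List.replicate_succ]
    · intro h; simp at h
  | cons o P2 ih =>
    have ho := hP o (by simp)
    have hP2 : OddD P2 := fun x hx => hP x (by simp [hx])
    obtain ⟨q, hq1, hq2, hq3⟩ : ∃ q : Int, o = 2 * q + 1 ∧ 0 ≤ q ∧ q ≤ 4 :=
      ⟨(o - 1) / 2, by omega⟩
    have hstep : ∀ (x : Int), fixCore x ((o :: P2) ++ (-1) :: List.replicate t 9) =
        (let vt := fixCore o (P2 ++ (-1) :: List.replicate t 9);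
         if vt.1 < 0 then (x - 2, 9 :: vt.2) else (x, vt.1 :: vt.2)) := fun x => rfl
    by_cases hall : P2.all (· = 1) = true
    · have hrepl : P2 = List.replicate P2.length 1 :=
        List.eq_replicate_of_mem (fun x hx => by
          have := List.all_eq_true.mp hall x hx; simpa using this)
      by_cases ho1 : o = 1
      · constructor
        · intro _
          rw [hstep d, (ih hP2 o).1 hall]
          subst ho1
          norm_num [List.replicate_succ]
          rw [show P2.length + 1 + t = P2.length + t + 1 from by omega, List.replicate_succ]
        · intro hfalse
          rw [List.all_cons] at hfalse
          simp [ho1, hall] at hfalse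
      · constructor
        · intro htrue
          rw [List.all_cons] at htrue
          simp [ho1] at htrue
        · intro _
          rw [hstep d, (ih hP2 o).1 hall]
          have hnn : ¬ (o - 2 < 0) := by omega
          refine ⟨(o - 2) :: List.replicate (P2.length + t + 1) 9, by simp [hnn], ?_, ?_, ?_⟩
          · intro x hx
            rcases List.mem_cons.mp hx with rfl | hx
            · omega
            · rw [List.eq_of_mem_replicate hx]; norm_num
          · simp; omega
          · have hRXP2 : RX P2 = ov P2.length := by
              conv_lhs => rw [hrepl]
              rw [RX_replicate1]
            rw [RX_cons, List.length_replicate, RX_replicate9, RX_cons, hRXP2,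
              List.length_cons, ov_succ' P2.length]
            have e1 : (o - 2 + 1) / 2 = q := by omega
            have e2 : (o + 1) / 2 = q + 1 := by omega
            rw [e1, e2]
            have e3 : P2.length + t + 1 = P2.length + (t + 1) := by omega
            have e4 : P2.length + 1 + t + 1 = P2.length + t + 1 + 1 := by omega
            rw [e3, e4, ov_succ' (P2.length + t + 1), e3, pow_add]
            rw [ov_succ' (P2.length + (t + 1)), pow_add]
            ring
    · have hfP2 : P2.all (· = 1) = false := by
        cases hval : P2.all (· = 1) with
        | true => exact absurd hval hall
        | false => rfl
      obtain ⟨rest2, hres2, hodd2, hlen2, hRX2⟩ := (ih hP2 o).2 hfP2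
      constructor
      · intro htrue
        rw [List.all_cons] at htrue
        simp at htrue
        have hcontra : P2.all (· = 1) = true :=
          List.all_eq_true.mpr (fun x hx => by simp [htrue.2 x hx])
        rw [hcontra] at hfP2
        cases hfP2
      · intro _
        rw [hstep d, hres2]
        have ho0 : ¬ ((o : Int) < 0) := by omega
        refine ⟨o :: rest2, by simp [ho0], ?_, ?_, ?_⟩
        · intro x hx
          rcases List.mem_cons.mp hx with rfl | hx
          · exact ho
          · exact hodd2 x hx
        · simp [hlen2]; omega
        · rw [RX_cons, hlen2, hRX2, RX_cons, List.length_cons, ov_succ' P2.length]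
          have e2 : (o + 1) / 2 = q + 1 := by omega
          rw [e2]
          have e3 : P2.length + t + 1 = P2.length + (t + 1) := by omega
          have e4 : P2.length + 1 + t + 1 = P2.length + t + 1 + 1 := by omega
          rw [e4, ov_succ' (P2.length + t + 1), e3, pow_add]
          ring

theorem valb0 (P : List Int) (hP : OddD P) (t : Nat) :
    valI (fixNeg (P ++ (-1) :: List.replicate t 9)) =
      unrankGo (5 ^ (t + 1) * (RX P - ov P.length) + ov (P.length + t + 1) - 1) 0 1 ∧
    DigD (fixNeg (P ++ (-1) :: List.replicate t 9)) := by
  have hodd9 : OddD (List.replicate t (9 : Int)) := by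
    intro x hx; rw [List.eq_of_mem_replicate hx]; norm_num
  cases P with
  | nil =>
    have hstep : fixNeg ((-1) :: List.replicate t 9) =
        (let vt := fixCore (-1) (List.replicate t 9);
         (if vt.1 < 0 then 0 else vt.1) :: vt.2) := rfl
    rw [List.nil_append, hstep, fixCore_neg1_nines]
    norm_num
    constructor
    · rw [valI_cons, ← u_rank (List.replicate t 9) hodd9, RX_replicate9]
      simp [show RX ([] : List Int) = 0 from rfl, show ov 0 = 0 from rfl]
    · intro x hx
      rcases List.mem_cons.mp hx with rfl | hx
      · norm_num
      · rw [List.eq_of_mem_replicate hx]; norm_num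
  | cons p0 P2 =>
    have hp0 := hP p0 (by simp)
    have hP2 : OddD P2 := fun x hx => hP x (by simp [hx])
    obtain ⟨q, hq1, hq2, hq3⟩ : ∃ q : Int, p0 = 2 * q + 1 ∧ 0 ≤ q ∧ q ≤ 4 :=
      ⟨(p0 - 1) / 2, by omega⟩
    have hstep : fixNeg ((p0 :: P2) ++ (-1) :: List.replicate t 9) =
        (let vt := fixCore p0 (P2 ++ (-1) :: List.replicate t 9);
         (if vt.1 < 0 then 0 else vt.1) :: vt.2) := rfl
    rw [hstep]
    by_cases hall : P2.all (· = 1) = true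
    · have hrepl : P2 = List.replicate P2.length 1 :=
        List.eq_replicate_of_mem (fun x hx => by
          have := List.all_eq_true.mp hall x hx; simpa using this)
      have hRXP2 : RX P2 = ov P2.length := by
        conv_lhs => rw [hrepl]
        rw [RX_replicate1]
      rw [(key_fix P2 hP2 p0 t).1 hall]
      by_cases hp1 : p0 = 1
      · subst hp1
        norm_num
        constructor
        · rw [valI_cons, ← u_rank (List.replicate (P2.length + t + 1) 9) (by
            intro x hx; rw [List.eq_of_mem_replicate hx]; norm_num), RX_replicate9]
          have harg : 5 ^ (t + 1) * (RX (1 :: P2) - ov (P2.length + 1)) = 0 := by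
            rw [RX_cons, hRXP2, ov_succ' P2.length]
            norm_num
          rw [harg, show P2.length + 1 + t + 1 = P2.length + t + 1 + 1 from by omega]
          norm_num
        · intro x hx
          rcases List.mem_cons.mp hx with rfl | hx
          · norm_num
          · rw [List.eq_of_mem_replicate hx]; norm_num
      · have hnn : ¬ (p0 - 2 < 0) := by omega
        simp only [hnn, if_false]
        have hoddr : OddD ((p0 - 2) :: List.replicate (P2.length + t + 1) 9) := by
          intro x hx
          rcases List.mem_cons.mp hx with rfl | hx
          · refine ⟨by omega, by omega, by omega⟩
          · rw [List.eq_of_mem_replicate hx]; norm_num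
        constructor
        · rw [← u_rank _ hoddr]
          congr 1
          rw [RX_cons, List.length_replicate, RX_replicate9, RX_cons, hRXP2,
            List.length_cons, ov_succ' P2.length]
          have e1 : (p0 - 2 + 1) / 2 = q := by omega
          have e2 : (p0 + 1) / 2 = q + 1 := by omega
          rw [e1, e2]
          have e3 : P2.length + t + 1 = P2.length + (t + 1) := by omega
          have e4 : P2.length + 1 + t + 1 = P2.length + t + 1 + 1 := by omega
          rw [e3, e4, ov_succ' (P2.length + t + 1), e3, pow_add]
          rw [ov_succ' (P2.length + (t + 1)), pow_add]
          ring
        · intro x hx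
          exact ⟨(hoddr x hx).1, (hoddr x hx).2.1⟩
    · have hfP2 : P2.all (· = 1) = false := by
        cases hval : P2.all (· = 1) with
        | true => exact absurd hval hall
        | false => rfl
      obtain ⟨rest2, hres2, hodd2, hlen2, hRX2⟩ := (key_fix P2 hP2 p0 t).2 hfP2
      rw [hres2]
      have hnn : ¬ ((p0 : Int) < 0) := by omega
      simp only [hnn, if_false]
      have hoddr : OddD (p0 :: rest2) := by
        intro x hx
        rcases List.mem_cons.mp hx with rfl | hx
        · exact hp0
        · exact hodd2 x hx
      constructor
      · rw [← u_rank _ hoddr]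
        congr 1
        rw [RX_cons, hlen2, hRX2, RX_cons, List.length_cons, ov_succ' P2.length]
        have e2 : (p0 + 1) / 2 = q + 1 := by omega
        rw [e2]
        have e4 : P2.length + 1 + t + 1 = P2.length + t + 1 + 1 := by omega
        rw [e4, ov_succ' (P2.length + t + 1),
          show P2.length + t + 1 = P2.length + (t + 1) from by omega, pow_add]
        ring
      · intro x hx
        exact ⟨(hoddr x hx).1, (hoddr x hx).2.1⟩

-- rankGo characterizations (on the char list; the digit list is its charDigit image)
theorem rankGo_odd (cs : List Char) (h : OddD (cs.map charDigit)) :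
    rankGo cs = (RX (cs.map charDigit) - ov cs.length, true) := by
  induction cs with
  | nil => simp [rankGo, RX, ov]
  | cons c cs ih =>
    have hd : 0 ≤ charDigit c ∧ charDigit c ≤ 9 ∧ charDigit c % 2 = 1 := h (charDigit c) (by simp)
    have hM : OddD (cs.map charDigit) := fun x hx => h x (by simp at hx ⊢; right; exact hx)
    obtain ⟨q, hq1, hq2, hq3⟩ : ∃ q : Int, charDigit c = 2 * q + 1 ∧ 0 ≤ q ∧ q ≤ 4 :=
      ⟨(charDigit c - 1) / 2, by omega⟩
    have hmod : ¬ PySem.Int.mod (charDigitB c) 2 = 0 := by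
      rw [PySem.Int.mod_eq_emod_of_pos (by norm_num)]
      show ¬ charDigit c % 2 = 0
      omega
    simp only [rankGo, hmod, if_false, ih hM]
    rw [List.map_cons, RX_cons, List.length_cons, List.length_map, ov_succ']
    have hfd : PySem.Int.floordiv (charDigitB c) 2 = q := by
      rw [PySem.Int.floordiv_eq_ediv_of_pos (by norm_num)]
      show charDigit c / 2 = q
      omega
    have hfd2 : (charDigit c + 1) / 2 = q + 1 := by omega
    rw [hfd, hfd2]
    congr 1
    ring
theorem rankGo_split (cs : List Char) (P : List Int) (hP : OddD P) (E : Int)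
    (hE : 0 ≤ E ∧ E ≤ 8 ∧ E % 2 = 0) (T : List Int)
    (hcs : cs.map charDigit = P ++ E :: T) :
    rankGo cs = (5 ^ (T.length + 1) * (RX P - ov P.length) + E / 2 * 5 ^ T.length, false) := by
  induction P generalizing cs with
  | nil =>
    cases cs with
    | nil => simp at hcs
    | cons c cs' =>
      rw [List.map_cons, List.nil_append] at hcs
      obtain ⟨hcE, hcT⟩ : charDigit c = E ∧ cs'.map charDigit = T := by
        exact ⟨by injection hcs, by injection hcs⟩
      have hmod : PySem.Int.mod (charDigitB c) 2 = 0 := by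
        rw [PySem.Int.mod_eq_emod_of_pos (by norm_num)]
        show charDigit c % 2 = 0
        omega
      have hlen : cs'.length = T.length := by rw [← hcT, List.length_map]
      simp only [rankGo, hmod, if_true, hlen]
      have hfd : PySem.Int.floordiv (charDigitB c) 2 = E / 2 := by
        rw [PySem.Int.floordiv_eq_ediv_of_pos (by norm_num)]
        show charDigit c / 2 = E / 2
        rw [hcE]
      rw [hfd]
      congr 1
      rw [show RX [] = 0 from rfl, show ov ([] : List Int).length = 0 from rfl]
      ring
  | cons p P' ih =>
    cases cs with
    | nil => simp at hcs
    | cons c cs' =>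
      rw [List.map_cons] at hcs
      obtain ⟨hcp, hcT⟩ : charDigit c = p ∧ cs'.map charDigit = P' ++ E :: T := by
        exact ⟨by injection hcs, by injection hcs⟩
      have hpd : 0 ≤ p ∧ p ≤ 9 ∧ p % 2 = 1 := hP p (by simp)
      obtain ⟨q, hq1, hq2, hq3⟩ : ∃ q : Int, p = 2 * q + 1 ∧ 0 ≤ q ∧ q ≤ 4 :=
        ⟨(p - 1) / 2, by omega⟩
      have hmod : ¬ PySem.Int.mod (charDigitB c) 2 = 0 := by
        rw [PySem.Int.mod_eq_emod_of_pos (by norm_num)]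
        show ¬ charDigit c % 2 = 0
        omega
      have hP' : OddD P' := fun x hx => hP x (by simp [hx])
      have hlen : cs'.length = P'.length + 1 + T.length := by
        have := congrArg List.length hcT
        simp at this
        omega
      simp only [rankGo, hmod, if_false, ih cs' hP' hcT]
      have hfd : PySem.Int.floordiv (charDigitB c) 2 = q := by
        rw [PySem.Int.floordiv_eq_ediv_of_pos (by norm_num)]
        show charDigit c / 2 = q
        omega
      rw [hfd, RX_cons, List.length_cons, ov_succ', hlen]
      congr 1
      have hfd2 : (p + 1) / 2 = q + 1 := by omega
      rw [hfd2, show P'.length + 1 + T.length = P'.length + (T.length + 1) from by omega,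
        pow_add]
      ring

-- string-layer bridges
theorem charDigit_digitChar (d : Nat) (h : d < 10) : charDigit (Nat.digitChar d) = (d : Int) := by
  interval_cases d <;> decide
theorem toDigits_structure (m : Nat) :
    ∃ L : List Nat, Nat.toDigits 10 m = L.map Nat.digitChar ∧ L ≠ [] ∧
      (∀ d ∈ L, d < 10) ∧ valN L = m := by
  induction m using Nat.strong_induction_on with
  | _ m ih =>
    by_cases h : m < 10
    · exact ⟨[m], by rw [Nat.toDigits_of_lt_base h]; simp, by simp, by simpa using h, by simp [valN]⟩
    · have h10 : m / 10 < m := Nat.div_lt_self (by omega) (by norm_num)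
      obtain ⟨L, hL, hne, hdig, hval⟩ := ih (m / 10) h10
      refine ⟨L ++ [m % 10], ?_, by simp, ?_, ?_⟩
      · rw [Nat.toDigits_eq_if (by norm_num), if_neg h, hL, List.map_append]
        simp
      · intro d hd
        rcases List.mem_append.mp hd with h1 | h1
        · exact hdig d h1
        · simp at h1; omega
      · have : valN (L ++ [m % 10]) = 10 * valN L + m % 10 := by
          simp [valN, List.foldl_append]
        omega
theorem valI_map_cast_aux :
    ∀ (L : List Nat) (a : Nat),
      (L.map (fun d => ((d : Nat) : Int))).foldl (fun a d => 10 * a + d) ((a : Nat) : Int) =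
        ((L.foldl (fun a d => 10 * a + d) a : Nat) : Int) := by
  intro L
  induction L with
  | nil => intro a; rfl
  | cons d M ih =>
    intro a
    rw [List.map_cons, List.foldl_cons, List.foldl_cons]
    have h1 : (10 : Int) * (a : Int) + (d : Int) = ((10 * a + d : Nat) : Int) := by push_cast; ring
    rw [h1]
    exact ih (10 * a + d)

theorem valI_map_cast (L : List Nat) :
    valI (L.map (fun d => ((d : Nat) : Int))) = (valN L : Int) := by
  simpa [valI, valN] using valI_map_cast_aux L 0
theorem toList_toStr_digit (d : Int) (h : 0 ≤ d ∧ d ≤ 9) :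
    (PySem.Int.toStr d).toList = [Nat.digitChar d.toNat] := by
  rw [PySem.Int.toList_toStr, PySem.Int.toChars, if_neg (by omega)]
  exact Nat.toDigits_of_lt_base (by omega)

theorem join_val (l : List Int) (h : DigD l) :
    intOfDigitStr (PySem.Str.join "" (l.map PySem.Int.toStr)) = valI l := by
  have hmap : (l.map PySem.Int.toStr).map String.toList =
      (l.map (fun d => Nat.digitChar d.toNat)).map (fun c => [c]) := by
    rw [List.map_map, List.map_map]
    apply List.map_congr_left
    intro d hd
    exact toList_toStr_digit d ⟨(h d hd).1, (h d hd).2⟩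
  rw [intOfDigitStr, PySem.Str.toList_join, show ("" : String).toList = [] from rfl, hmap,
    PySem.Chars.join_nil_singletons, List.foldl_map]
  rw [PySem.List.foldl_congr_mem _ _ (fun a d => 10 * a + d) 0 ?_]
  · rfl
  · intro acc x hx
    have hxd := h x hx
    rw [charDigit_digitChar x.toNat (by omega), Int.toNat_of_nonneg hxd.1]

theorem split_digits (L : List Int) (h : DigD L) :
    OddD L ∨ ∃ P E T, L = P ++ E :: T ∧ OddD P ∧ (0 ≤ E ∧ E ≤ 8 ∧ E % 2 = 0) ∧ DigD T := by
  induction L with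
  | nil => left; intro d hd; simp at hd
  | cons d M ih =>
    have hd := h d (by simp)
    have hM : DigD M := fun x hx => h x (by simp [hx])
    by_cases hpar : d % 2 = 1
    · rcases ih hM with ho | ⟨P, E, T, hsp, hPo, hEe, hTd⟩
      · left
        intro x hx
        rcases List.mem_cons.mp hx with rfl | hx
        · exact ⟨hd.1, hd.2, hpar⟩
        · exact ho x hx
      · right
        exact ⟨d :: P, E, T, by simp [hsp], fun x hx => by
          rcases List.mem_cons.mp hx with rfl | hx
          · exact ⟨hd.1, hd.2, hpar⟩
          · exact hPo x hx, hEe, hTd⟩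
    · right
      exact ⟨[], d, M, by simp, fun x hx => by simp at hx, ⟨hd.1, by omega, by omega⟩, hM⟩

theorem u1_eq : unrankGo 1 0 1 = 1 := by
  rw [unrankGo_step 1 (by norm_num)]
  norm_num [unrankGo_zero 0 le_rfl]

theorem main_eq (n : Int) (hn : 0 ≤ n) : solve n = solve_alt n := by
  by_cases hn0 : n = 0
  · subst hn0
    have hA : solve 0 = 1 := by simp [solve]
    have hB : solve_alt 0 = 1 := by
      simp only [solve_alt]
      rw [show (PySem.Int.toStr 0).toList = ['0'] from rfl]
      rw [show rankGo ['0'] = (0, false) from rfl]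
      norm_num [show PySem.Int.floordiv (5 ^ (['0'].length) - 5) 4 = 0 from rfl,
        unrankGo_zero 0 le_rfl, u1_eq]
    rw [hA, hB]
  · obtain ⟨LN, hLN, hne, hdig, hval⟩ := toDigits_structure n.toNat
    have hSL : (PySem.Int.toStr n).toList = LN.map Nat.digitChar := by
      rw [PySem.Int.toList_toStr, PySem.Int.toChars, if_neg (by omega)]
      exact hLN
    set L : List Int := LN.map (fun d => ((d : Nat) : Int)) with hLdef
    have hmapCD : (LN.map Nat.digitChar).map charDigit = L := by
      rw [List.map_map, hLdef]
      apply List.map_congr_left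
      intro d hd
      exact charDigit_digitChar d (hdig d hd)
    have hLdig : DigD L := by
      intro x hx
      rw [hLdef] at hx
      obtain ⟨d, hd, rfl⟩ := List.mem_map.mp hx
      have := hdig d hd
      omega
    have hvalL : valI L = n := by
      rw [hLdef, valI_map_cast, hval, Int.toNat_of_nonneg hn]
    have hLne : L ≠ [] := by
      rw [hLdef]
      simpa using hne
    have hAdig : (PySem.Int.toStr n).toList.map charDigit = L := by rw [hSL, hmapCD]
    have hslen : ((PySem.Int.toStr n).toList).length = L.length := by
      have := congrArg List.length hAdig
      simpa using this
    have hkpos : 0 < L.length := List.length_pos_iff.mpr hLne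
    rcases split_digits L hLdig with hoddL | ⟨P, E, T, hsp, hPo, hEe, hTd⟩
    · -- all digits odd: both sides return n
      have hRG : rankGo (PySem.Int.toStr n).toList = (RX L - ov L.length, true) := by
        have h0 := rankGo_odd (PySem.Int.toStr n).toList (by rw [hAdig]; exact hoddL)
        rw [hAdig, hslen] at h0
        exact h0
      have hJ : intOfDigitStr (PySem.Str.join "" (L.map PySem.Int.toStr)) = valI L :=
        join_val L hLdig
      have hA : solve n = n := by
        rw [solve.eq_1]
        simp only [if_neg hn0, hAdig, buildAB_odd L hoddL,
          fixNeg_nonneg L (fun d hd => (hLdig d hd).1), hJ, hvalL]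
        simp
      have hr0 : 0 ≤ RX L := RX_nonneg L hLdig
      have hrpos : 0 < RX L := by
        have h1 := RX_ge_ov L hoddL
        obtain ⟨m, hm⟩ : ∃ m, L.length = m + 1 := ⟨L.length - 1, by omega⟩
        rw [hm] at h1
        have := ov_ge_one m
        omega
      have hB : solve_alt n = n := by
        rw [solve_alt.eq_1]
        simp only [hRG, hslen, basep_eq, if_true]
        have hr : ov L.length - 1 + (RX L - ov L.length) + 1 = RX L := by ring
        rw [hr, u_rank L hoddL, hvalL]
        have hmono := u_mono (RX L) hr0
        rw [u_rank L hoddL, hvalL] at hmono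
        simp only [hrpos, true_and, if_pos (by omega : n - n < unrankGo (RX L + 1) 0 1 - n)]
      rw [hA, hB]
    · -- first even digit E after odd prefix P
      have hEb := hEe
      have hOddA : OddD (P ++ (E + 1) :: List.replicate T.length 1) := by
        intro x hx
        rcases List.mem_append.mp hx with hx | hx
        · exact hPo x hx
        · rcases List.mem_cons.mp hx with rfl | hx
          · exact ⟨by omega, by omega, by omega⟩
          · rw [List.eq_of_mem_replicate hx]; norm_num
      have hlenk : L.length = P.length + 1 + T.length := by
        rw [hsp]; simp; omega
      have hRG : rankGo (PySem.Int.toStr n).toList =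
          (5 ^ (T.length + 1) * (RX P - ov P.length) + E / 2 * 5 ^ T.length, false) := by
        exact rankGo_split _ P hPo E hEe T (by rw [hAdig]; exact hsp)
      -- the two neighbour ranks
      have hRXA : RX (P ++ (E + 1) :: List.replicate T.length 1) =
          ov L.length - 1 + (5 ^ (T.length + 1) * (RX P - ov P.length) +
            E / 2 * 5 ^ T.length) + 1 := by
        rw [RX_appendL, RX_cons, RX_replicate1, List.length_cons, List.length_replicate, hlenk]
        have hE2 : (E + 1 + 1) / 2 = E / 2 + 1 := by omega
        rw [hE2, show P.length + 1 + T.length = P.length + T.length + 1 from by omega,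
          ov3 P.length T.length]
        ring
      have hrpos : 0 < ov L.length - 1 +
          (5 ^ (T.length + 1) * (RX P - ov P.length) + E / 2 * 5 ^ T.length) := by
        have hge : 0 ≤ RX P - ov P.length := by have := RX_ge_ov P hPo; omega
        have h1 : (0 : Int) ≤ 5 ^ (T.length + 1) * (RX P - ov P.length) :=
          mul_nonneg (by positivity) hge
        have h2 : (0 : Int) ≤ E / 2 * 5 ^ T.length :=
          mul_nonneg (by omega) (by positivity)
        by_cases hk1 : P.length = 0 ∧ T.length = 0
        · -- single even digit: L = [E] and E = n ≥ 2
          have hPnil : P = [] := List.eq_nil_of_length_eq_zero hk1.1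
          have hTnil : T = [] := List.eq_nil_of_length_eq_zero hk1.2
          have hLE : L = [E] := by rw [hsp, hPnil, hTnil]; rfl
          have hEn : E = n := by
            rw [hLE] at hvalL
            rw [← hvalL, valI_cons]
            simp [valI]
          have hE2 : 1 ≤ E / 2 := by omega
          rw [hPnil, hTnil, hlenk, hk1.1, hk1.2]
          norm_num [show RX ([] : List Int) = 0 from rfl, show ov 0 = 0 from rfl,
            show ov 1 = 1 from by norm_num [ov]]
          omega
        · have hk2 : 2 ≤ L.length := by omega
          obtain ⟨m, hm⟩ : ∃ m, L.length = m + 2 := ⟨L.length - 2, by omega⟩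
          have hov : 6 ≤ ov (m + 2) := by
            have := ov_ge_one m
            rw [ov]
            omega
          rw [hm]
          omega
      -- A's candidate a equals unrank (r+1)
      have hJA : intOfDigitStr (PySem.Str.join ""
            ((P ++ (E + 1) :: List.replicate T.length 1).map PySem.Int.toStr)) =
          unrankGo (ov L.length - 1 + (5 ^ (T.length + 1) * (RX P - ov P.length) +
            E / 2 * 5 ^ T.length) + 1) 0 1 := by
        rw [join_val _ (fun x hx => ⟨(hOddA x hx).1, (hOddA x hx).2.1⟩),
          ← u_rank _ hOddA, hRXA]
      -- A's candidate b equals unrank r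
      have hJB : intOfDigitStr (PySem.Str.join ""
            ((fixNeg (P ++ (E - 1) :: List.replicate T.length 9)).map PySem.Int.toStr)) =
          unrankGo (ov L.length - 1 + (5 ^ (T.length + 1) * (RX P - ov P.length) +
            E / 2 * 5 ^ T.length)) 0 1 := by
        by_cases hE0 : E = 0
        · subst hE0
          have hv := valb0 P hPo T.length
          rw [show (0 : Int) - 1 = -1 from rfl]
          rw [join_val _ hv.2, hv.1]
          congr 1
          have e1 : P.length + T.length + 1 = P.length + 1 + T.length := by omega
          rw [e1, ← hlenk]
          ring
        · have hOddB : OddD (P ++ (E - 1) :: List.replicate T.length 9) := by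
            intro x hx
            rcases List.mem_append.mp hx with hx | hx
            · exact hPo x hx
            · rcases List.mem_cons.mp hx with rfl | hx
              · exact ⟨by omega, by omega, by omega⟩
              · rw [List.eq_of_mem_replicate hx]; norm_num
          rw [fixNeg_nonneg _ (fun d hd => (hOddB d hd).1),
            join_val _ (fun x hx => ⟨(hOddB x hx).1, (hOddB x hx).2.1⟩), ← u_rank _ hOddB]
          congr 1
          rw [RX_appendL, RX_cons, RX_replicate9, List.length_cons, List.length_replicate, hlenk]
          have hE2 : (E - 1 + 1) / 2 = E / 2 := by omega
          rw [hE2, show P.length + 1 + T.length = P.length + T.length + 1 from by omega,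
            ov3 P.length T.length, ov_succ' T.length]
          ring
      have hA : solve n = if n - unrankGo (ov L.length - 1 + (5 ^ (T.length + 1) *
            (RX P - ov P.length) + E / 2 * 5 ^ T.length)) 0 1 <
            unrankGo (ov L.length - 1 + (5 ^ (T.length + 1) * (RX P - ov P.length) +
              E / 2 * 5 ^ T.length) + 1) 0 1 - n
          then unrankGo (ov L.length - 1 + (5 ^ (T.length + 1) * (RX P - ov P.length) +
            E / 2 * 5 ^ T.length)) 0 1
          else unrankGo (ov L.length - 1 + (5 ^ (T.length + 1) * (RX P - ov P.length) +
            E / 2 * 5 ^ T.length) + 1) 0 1 := by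
        rw [solve.eq_1]
        simp only [if_neg hn0, hAdig, hsp, buildAB_split P hPo E hEe T]
        rw [← hsp, hJA, hJB]
      have hB : solve_alt n = if 0 < ov L.length - 1 + (5 ^ (T.length + 1) *
            (RX P - ov P.length) + E / 2 * 5 ^ T.length) ∧
            n - unrankGo (ov L.length - 1 + (5 ^ (T.length + 1) * (RX P - ov P.length) +
              E / 2 * 5 ^ T.length)) 0 1 <
            unrankGo (ov L.length - 1 + (5 ^ (T.length + 1) * (RX P - ov P.length) +
              E / 2 * 5 ^ T.length) + 1) 0 1 - n
          then unrankGo (ov L.length - 1 + (5 ^ (T.length + 1) * (RX P - ov P.length) +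
            E / 2 * 5 ^ T.length)) 0 1
          else unrankGo (ov L.length - 1 + (5 ^ (T.length + 1) * (RX P - ov P.length) +
            E / 2 * 5 ^ T.length) + 1) 0 1 := by
        rw [solve_alt.eq_1]
        simp only [hRG, hslen, basep_eq]
        norm_num
      rw [hA, hB]
      by_cases hc : n - unrankGo (ov L.length - 1 + (5 ^ (T.length + 1) *
            (RX P - ov P.length) + E / 2 * 5 ^ T.length)) 0 1 <
          unrankGo (ov L.length - 1 + (5 ^ (T.length + 1) * (RX P - ov P.length) +
            E / 2 * 5 ^ T.length) + 1) 0 1 - n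
      · rw [if_pos hc, if_pos ⟨hrpos, hc⟩]
      · rw [if_neg hc, if_neg (by tauto)]

-- ===== VERDICT (by name: the statement is the Claim_ definition above) =====
theorem solve_spec : Claim_equal_solve := by
  intro n _ hp
  unfold Spec_solve
  exact main_eq n hp
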